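-- pv_equiv track=rewrite | github.com/nbglink/pokadviser | poker_oop_tool.py | nut_flush_draw
-- ===== SOURCE A (Python) =====
-- def made_flush(hole, board):
--     """Проверява дали имаме made flush (5+ карти от една боя, поне 1 hole card)."""
--     for suit in set(c[1] for c in hole):
--         cnt_hole = sum(1 for c in hole if c[1] == suit)
--         cnt_board = sum(1 for c in board if c[1] == suit)
--         if cnt_hole >= 1 and cnt_hole + cnt_board >= 5:
--             return True
--     return False
--
-- def flush_draw(hole, board):
--     """Проверява за flush draw (4 карти от една боя, поне 1 hole card). Не е draw ако вече е made."""
--     if made_flush(hole, board):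
--         return False
--     for suit in set(c[1] for c in hole):
--         cnt_hole = sum(1 for c in hole if c[1] == suit)
--         cnt_board = sum(1 for c in board if c[1] == suit)
--         if cnt_hole >= 1 and cnt_hole + cnt_board >= 4:
--             return True
--     return False
--
-- def nut_flush_draw(hole, board):
--     """Имаме ли Ace от flush draw боята?"""
--     if not flush_draw(hole, board):
--         return False
--     for suit in set(c[1] for c in hole):
--         cnt = sum(1 for c in hole + board if c[1] == suit)
--         if cnt >= 4:
--             if any(c[0] == 'A' and c[1] == suit for c in hole):
--                 return True
--     return False
-- ===== SOURCE B (Python) =====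
-- def nut_flush_draw(hole, board):
--     total = {}
--     for c in hole + board:
--         total[c[1]] = total.get(c[1], 0) + 1
--     hole_suits = {c[1] for c in hole}
--     if any(total[s] >= 5 for s in hole_suits):
--         return False
--     return any(c[0] == 'A' and total[c[1]] >= 4 for c in hole)
-- ===== Notes on version B (the rewrite author's own statement) =====
-- stated objective: simpler
-- what changed: Collapses the three helpers (made_flush/flush_draw and their repeated sum-comprehension re-scans over hole and board per suit) into one pass that builds a suit-count table for hole+board once, then a single any over hole suits for a made flush and a single scan of hole for an Ace of a suit with total count >= 4 (the Ace condition itself implies the flush draw, so the separate draw check disappears).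
-- outside the precondition, e.g. on nut_flush_draw([], ['A']): A returns False, B raises IndexError
import Mathlib
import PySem

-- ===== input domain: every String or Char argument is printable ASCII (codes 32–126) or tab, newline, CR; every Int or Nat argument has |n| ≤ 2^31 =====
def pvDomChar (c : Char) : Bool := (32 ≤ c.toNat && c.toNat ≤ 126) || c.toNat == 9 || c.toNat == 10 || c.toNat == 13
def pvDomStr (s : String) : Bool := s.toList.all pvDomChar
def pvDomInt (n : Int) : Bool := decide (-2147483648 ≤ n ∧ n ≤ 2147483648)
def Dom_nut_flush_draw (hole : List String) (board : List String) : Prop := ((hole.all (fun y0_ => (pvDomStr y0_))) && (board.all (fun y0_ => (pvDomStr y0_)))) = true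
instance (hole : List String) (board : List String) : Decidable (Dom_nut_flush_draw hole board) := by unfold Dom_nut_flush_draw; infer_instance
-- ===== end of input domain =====

-- B replaces the three re-scanning helpers by one suit-count table built in a single pass
-- plus one scan of the hole cards (objective: simpler).

-- shared card accessors: c[1] and c[0] (total with a default; Pre_ keeps Python's IndexError inputs out)
def pvSuit (c : String) : Char := (PySem.Str.pyGet? c 1).getD ' '
def pvRank (c : String) : Char := (PySem.Str.pyGet? c 0).getD ' '

-- ===== PORT A =====
-- sum(1 for c in cs if c[1] == suit)
def pvCnt (cs : List String) (s : Char) : Nat :=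
  cs.countP (fun c => pvSuit c == s)

def pvMadeFlush (hole : List String) (board : List String) : Bool :=
  (PySem.Set.ofList (hole.map pvSuit)).any (fun s =>
    decide (1 ≤ pvCnt hole s) && decide (5 ≤ pvCnt hole s + pvCnt board s))

def pvFlushDraw (hole : List String) (board : List String) : Bool :=
  if pvMadeFlush hole board then false
  else (PySem.Set.ofList (hole.map pvSuit)).any (fun s =>
    decide (1 ≤ pvCnt hole s) && decide (4 ≤ pvCnt hole s + pvCnt board s))

def nut_flush_draw (hole : List String) (board : List String) : Bool :=
  if !pvFlushDraw hole board then false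
  else (PySem.Set.ofList (hole.map pvSuit)).any (fun s =>
    if 4 ≤ pvCnt (hole ++ board) s then
      hole.any (fun c => pvRank c == 'A' && pvSuit c == s)
    else false)

-- ===== PORT B =====
def nut_flush_draw_alt (hole : List String) (board : List String) : Bool :=
  let total := (hole ++ board).foldl
    (fun d c => d.insert (pvSuit c) (d.getD (pvSuit c) 0 + 1)) (PySem.Dict.empty)
  let holeSuits := PySem.Set.ofList (hole.map pvSuit)
  if holeSuits.any (fun s => decide ((5 : Int) ≤ total.getD s 0)) then false
  else hole.any (fun c => pvRank c == 'A' && decide ((4 : Int) ≤ total.getD (pvSuit c) 0))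

-- ===== PRECONDITION & SPEC =====
-- Pre_ excludes inputs containing a card string of length < 2: on those A raises IndexError
-- (c[1]/c[0]), except that with an empty hole A never inspects the board and returns False while
-- B's single counting pass still indexes the board cards and raises.
def Pre_nut_flush_draw (hole : List String) (board : List String) : Prop :=
  (∀ c ∈ hole, 2 ≤ c.length) ∧ (∀ c ∈ board, 2 ≤ c.length)
instance (hole : List String) (board : List String) : Decidable (Pre_nut_flush_draw hole board) := by
  unfold Pre_nut_flush_draw; infer_instance

def pvWitness_nut_flush_draw : List String × List String :=
  (["As", "Ks"], ["2s", "7s", "9d"])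

def Spec_nut_flush_draw (hole : List String) (board : List String) (out : Bool) : Prop := out = nut_flush_draw_alt hole board
instance (hole : List String) (board : List String) (out : Bool) : Decidable (Spec_nut_flush_draw hole board out) := by unfold Spec_nut_flush_draw; infer_instance

-- ===== CLAIM (what is proved, stated in full; the proofs are below) =====
def Claim_equal_nut_flush_draw : Prop := ∀ (hole : List String) (board : List String), Dom_nut_flush_draw hole board → Pre_nut_flush_draw hole board → Spec_nut_flush_draw hole board (nut_flush_draw hole board)

-- ===== LEMMAS AND PROOFS =====

-- B's suit table looks up the total suit count of hole ++ board
theorem pv_getD_total_aux (xs : List String) (s : Char) (d : PySem.Dict Char Int) :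
    ((xs.foldl (fun d c => d.insert (pvSuit c) (d.getD (pvSuit c) 0 + 1)) d).getD s 0)
    = d.getD s 0 + (pvCnt xs s : Int) := by
  induction xs generalizing d with
  | nil => simp [pvCnt]
  | cons c xs ih =>
    rw [List.foldl_cons, ih, PySem.Dict.getD_insert]
    simp only [pvCnt, List.countP_cons]
    by_cases h : pvSuit c = s
    · subst h; simp; try omega
    · simp [h, Ne.symm h]; try omega

theorem pv_getD_total (xs : List String) (s : Char) :
    ((xs.foldl (fun d c => d.insert (pvSuit c) (d.getD (pvSuit c) 0 + 1)) PySem.Dict.empty).getD s 0)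
    = (pvCnt xs s : Int) := by
  rw [pv_getD_total_aux]; simp [PySem.Dict.getD_empty]

theorem pv_one_le_cnt {hole : List String} {s : Char}
    (h : s ∈ hole.map pvSuit) : 1 ≤ pvCnt hole s := by
  rcases List.mem_map.mp h with ⟨c, hc, rfl⟩
  have : 0 < pvCnt hole (pvSuit c) := List.countP_pos_iff.mpr ⟨c, hc, by simp⟩
  omega

theorem nut_flush_draw_spec : Claim_equal_nut_flush_draw := by
  intro hole board _ _
  unfold Spec_nut_flush_draw
  rw [Bool.eq_iff_iff]
  simp [nut_flush_draw, nut_flush_draw_alt, pvFlushDraw, pvMadeFlush,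
    pv_getD_total, PySem.Set.mem_ofList, -List.foldl_append]
  have hcnt : ∀ s, pvCnt (hole ++ board) s = pvCnt hole s + pvCnt board s := by
    intro s; simp [pvCnt, List.countP_append]
  have hone : ∀ x ∈ hole, 1 ≤ pvCnt hole (pvSuit x) := by
    intro x hx; exact pv_one_le_cnt (List.mem_map_of_mem hx)
  constructor
  · rintro ⟨⟨hmade, -⟩, a, ha, h4, x, hx, hA, hsx⟩
    refine ⟨fun y hy => ?_, x, hx, hA, by rw [hsx]; exact h4⟩
    have h5 := hmade y hy (hone y hy)
    rw [hcnt]; omega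
  · rintro ⟨hm, x, hx, hA, h4⟩
    have h4' := h4; rw [hcnt] at h4'
    refine ⟨⟨fun y hy _ => ?_, x, hx, hone x hx, by omega⟩, x, hx, h4, x, hx, hA, rfl⟩
    have := hm y hy; rw [hcnt] at this; omega
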